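-- pv_equiv track=rewrite | github.com/AbolfazlAdhami/Algorithms-Data-Structures | Python/Numbers/total_inc_dev.py | total_inc_dec
-- ===== SOURCE A (Python) =====
-- from math import comb
--
-- def total_inc_dec(x):
--     if x == 0:
--         return 1
--     total = 10
--     for k in range(2, x+1):
--         inc = comb(k + 8, 8)
--
--         dec = comb(k + 9, 9) - 1
--         total += inc + dec - 9
--     return total
-- ===== SOURCE B (Python) =====
-- from math import comb
--
-- def total_inc_dec(x):
--     # hockey-stick identity collapses A's loop into a closed form
--     return comb(x + 9, 9) + comb(x + 10, 10) - 10 * x - 1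
-- ===== Notes on version B (the rewrite author's own statement) =====
-- stated objective: faster
-- what changed: Replaces A's loop of per-k binomial coefficients by a single closed form obtained from the hockey-stick identity: comb(x+9,9)+comb(x+10,10)-10*x-1.
-- outside the precondition, e.g. on total_inc_dec(-1): A returns 10, B returns 9; on total_inc_dec(-10): A returns 10, B raises ValueError
import Mathlib
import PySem

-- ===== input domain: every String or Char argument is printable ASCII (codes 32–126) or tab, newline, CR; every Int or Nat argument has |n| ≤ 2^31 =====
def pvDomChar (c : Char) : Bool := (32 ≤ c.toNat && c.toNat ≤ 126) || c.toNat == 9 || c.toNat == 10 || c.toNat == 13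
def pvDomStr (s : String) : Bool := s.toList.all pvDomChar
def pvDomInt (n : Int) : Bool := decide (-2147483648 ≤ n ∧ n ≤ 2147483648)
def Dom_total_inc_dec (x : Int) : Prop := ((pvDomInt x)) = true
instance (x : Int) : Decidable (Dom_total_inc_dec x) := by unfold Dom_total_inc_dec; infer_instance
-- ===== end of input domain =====

-- B replaces A's O(x) loop of binomial sums by the hockey-stick closed form comb(x+9,9)+comb(x+10,10)-10x-1 (faster).


-- math.comb(n, k) for nonnegative int arguments (exact there; both ports only call it with n, k ≥ 0 inside Pre_)
def pyComb (n k : Int) : Int := (n.toNat.choose k.toNat : Int)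

-- ===== PORT A =====
def total_inc_dec (x : Int) : Int :=
  if x = 0 then 1
  else
    (PySem.List.pyRange 2 (x + 1) 1).foldl
      (fun total k => total + (pyComb (k + 8) 8 + (pyComb (k + 9) 9 - 1) - 9)) 10

-- ===== PORT B =====
def total_inc_dec_alt (x : Int) : Int :=
  pyComb (x + 9) 9 + pyComb (x + 10) 10 - 10 * x - 1

-- ===== PRECONDITION & SPEC =====
-- Pre_ excludes negative x, where no digit count is defined: A there returns its loop seed 10
-- unchanged (the range is empty), while B's closed form returns other values (x = -1 … -8) or raises (x ≤ -9).
def Pre_total_inc_dec (x : Int) : Prop := 0 ≤ x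
instance (x : Int) : Decidable (Pre_total_inc_dec x) := by unfold Pre_total_inc_dec; infer_instance
def pvWitness_total_inc_dec : Int := (3)

def Spec_total_inc_dec (x : Int) (out : Int) : Prop := out = total_inc_dec_alt x
instance (x : Int) (out : Int) : Decidable (Spec_total_inc_dec x out) := by unfold Spec_total_inc_dec; infer_instance

-- ===== CLAIM (what is proved, stated in full; the proofs are below) =====
def Claim_equal_total_inc_dec : Prop := ∀ (x : Int), Dom_total_inc_dec x → Pre_total_inc_dec x → Spec_total_inc_dec x (total_inc_dec x)

-- ===== LEMMAS AND PROOFS =====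

-- the loop body's contribution at step k, written on naturals
lemma alt_step (n : Nat) :
    total_inc_dec_alt ((n : Int) + 1) =
      total_inc_dec_alt (n : Int)
        + (pyComb ((n : Int) + 1 + 8) 8 + (pyComb ((n : Int) + 1 + 9) 9 - 1) - 9) := by
  have h9 : ((n : Int) + 9).toNat = n + 9 := by omega
  have h10 : ((n : Int) + 10).toNat = n + 10 := by omega
  have h11 : ((n : Int) + 1 + 10).toNat = n + 11 := by omega
  have h10' : ((n : Int) + 1 + 9).toNat = n + 10 := by omega
  have h9' : ((n : Int) + 1 + 8).toNat = n + 9 := by omega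
  simp only [total_inc_dec_alt, pyComb, h9, h10, h11, h10', h9',
    show ((8 : Int)).toNat = 8 from rfl, show ((9 : Int)).toNat = 9 from rfl,
    show ((10 : Int)).toNat = 10 from rfl]
  have p1 : (n + 10).choose 9 = (n + 9).choose 8 + (n + 9).choose 9 := by
    simpa using Nat.choose_succ_succ (n + 9) 8
  have p2 : (n + 11).choose 10 = (n + 10).choose 9 + (n + 10).choose 10 := by
    simpa using Nat.choose_succ_succ (n + 10) 9
  push_cast [p1, p2]
  ring

lemma a_eq_b_nat (n : Nat) : total_inc_dec (n : Int) = total_inc_dec_alt (n : Int) := by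
  induction n with
  | zero => decide
  | succ m ih =>
    cases m with
    | zero => decide
    | succ l =>
      -- x = l + 2 ≥ 2: split the range at its last element
      have hx : ((l + 2 : Nat) : Int) ≠ 0 := by omega
      have hx' : ((l + 1 : Nat) : Int) ≠ 0 := by omega
      have hsplit : PySem.List.pyRange 2 (((l + 2 : Nat) : Int) + 1) 1
          = PySem.List.pyRange 2 (((l + 1 : Nat) : Int) + 1) 1 ++ [((l + 1 : Nat) : Int) + 1] := by
        have h2 : (2 : Int) ≤ ((l + 1 : Nat) : Int) + 1 := by omega
        have := PySem.List.pyRange_one_succ_right (a := 2) (b := ((l + 1 : Nat) : Int) + 1) h2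
        simpa [show (((l + 2 : Nat) : Int) + 1) = (((l + 1 : Nat) : Int) + 1) + 1 by push_cast; ring] using this
      have hA : total_inc_dec ((l + 2 : Nat) : Int)
          = total_inc_dec ((l + 1 : Nat) : Int)
            + (pyComb (((l + 1 : Nat) : Int) + 1 + 8) 8 + (pyComb (((l + 1 : Nat) : Int) + 1 + 9) 9 - 1) - 9) := by
        simp only [total_inc_dec, if_neg hx, if_neg hx', hsplit, List.foldl_append, List.foldl]
      rw [hA, ih, show (((l + 2 : Nat) : Int)) = ((l + 1 : Nat) : Int) + 1 by push_cast; ring,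
        alt_step (l + 1)]

-- ===== VERDICT (by name: the statement is the Claim_ definition above) =====
theorem total_inc_dec_spec : Claim_equal_total_inc_dec := by
  intro x _ hpre
  unfold Spec_total_inc_dec
  obtain ⟨n, rfl⟩ := Int.eq_ofNat_of_zero_le hpre
  exact a_eq_b_nat n
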